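-- pv_equiv track=rewrite | github.com/alxgraphy/readme-generator | src/template.py | _create_features_grid
-- ===== SOURCE A (Python) =====
-- def _create_features_grid(features: list) -> str:
--     """Create a grid layout for features"""
--     grid = "<table>\n<tr>\n"
--
--     for i, feature in enumerate(features):
--         if i > 0 and i % 2 == 0:
--             grid += "</tr>\n<tr>\n"
--
--         emoji = feature.split()[0]
--         text = ' '.join(feature.split()[1:])
--
--         grid += f"<td width=\"50%\">\n\n**{emoji} {text.split(' - ')[0]}**\n\n"
--         if ' - ' in text:
--             grid += f"<br/>{text.split(' - ')[1]}\n\n"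
--         grid += "</td>\n"
--
--     # Fill empty cells if odd number
--     if len(features) % 2 != 0:
--         grid += "<td></td>\n"
--
--     grid += "</tr>\n</table>"
--     return grid
-- ===== SOURCE B (Python) =====
-- def _cell(feature):
--     words = feature.split()
--     emoji = words[0]
--     text = ' '.join(words[1:])
--     s = f'<td width="50%">\n\n**{emoji} {text.split(" - ")[0]}**\n\n'
--     if ' - ' in text:
--         s += f'<br/>{text.split(" - ")[1]}\n\n'
--     return s + '</td>\n'
--
-- def _create_features_grid(features: list) -> str:
--     cells = [_cell(f) for f in features]
--     if len(cells) % 2 == 1: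
--         cells.append('<td></td>\n')
--     it = iter(cells)
--     rows = [a + b for a, b in zip(it, it)]
--     return '<table>\n<tr>\n' + '</tr>\n<tr>\n'.join(rows) + '</tr>\n</table>'
-- ===== Notes on version B (the rewrite author's own statement) =====
-- stated objective: simpler
-- what changed: Replaces A's single parity-tracked string-accumulator loop (inserting row breaks when i%2==0 and patching a lone trailing cell afterwards) by a map-each-feature-to-its-cell, chunk-cells-into-pairs, join-rows decomposition.
import Mathlib
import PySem

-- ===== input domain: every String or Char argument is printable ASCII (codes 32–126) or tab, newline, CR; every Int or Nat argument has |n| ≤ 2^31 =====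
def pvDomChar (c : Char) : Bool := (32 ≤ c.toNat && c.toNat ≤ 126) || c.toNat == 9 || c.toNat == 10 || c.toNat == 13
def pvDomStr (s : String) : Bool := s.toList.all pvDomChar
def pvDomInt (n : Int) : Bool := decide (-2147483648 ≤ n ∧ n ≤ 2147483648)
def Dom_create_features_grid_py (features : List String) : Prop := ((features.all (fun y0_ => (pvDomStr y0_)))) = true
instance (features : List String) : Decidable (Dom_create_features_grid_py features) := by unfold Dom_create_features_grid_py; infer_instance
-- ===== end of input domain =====

-- B replaces A's single parity-tracked accumulator loop by a build-cells / chunk-into-rows / join decomposition (objective: simpler).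

-- ===== PORT A =====
def create_features_grid_py (features : List String) : String :=
  let grid := "<table>\n<tr>\n"
  let grid := (PySem.List.enumerate features 0).foldl (fun grid p =>
    let i := p.1
    let feature := p.2
    let grid := if i > 0 ∧ PySem.Int.mod i 2 = 0 then grid ++ "</tr>\n<tr>\n" else grid
    let ws := PySem.Str.split₀ feature
    let emoji := (PySem.List.pyGet? ws 0).getD ""      -- feature.split()[0]; IndexError (excluded by Pre_) ↦ ""
    let text := PySem.Str.join " " (PySem.List.slice ws (some 1) none)
    let grid := grid ++ "<td width=\"50%\">\n\n**" ++ emoji ++ " " ++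
      (PySem.List.pyGet? ((PySem.Str.split? text " - ").getD []) 0).getD "" ++ "**\n\n"
    let grid := if PySem.Str.isIn " - " text then
        grid ++ "<br/>" ++ (PySem.List.pyGet? ((PySem.Str.split? text " - ").getD []) 1).getD "" ++ "\n\n"
      else grid
    grid ++ "</td>\n") grid
  let grid := if ¬ (PySem.Int.mod (features.length : Int) 2 = 0) then grid ++ "<td></td>\n" else grid
  grid ++ "</tr>\n</table>"

-- ===== PORT B =====
-- _cell from Source B
def pvCell (feature : String) : String :=
  let ws := PySem.Str.split₀ feature
  let emoji := (PySem.List.pyGet? ws 0).getD ""        -- words[0]; IndexError (excluded by Pre_) ↦ ""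
  let text := PySem.Str.join " " (PySem.List.slice ws (some 1) none)
  let s := "<td width=\"50%\">\n\n**" ++ emoji ++ " " ++
    (PySem.List.pyGet? ((PySem.Str.split? text " - ").getD []) 0).getD "" ++ "**\n\n"
  let s := if PySem.Str.isIn " - " text then
      s ++ "<br/>" ++ (PySem.List.pyGet? ((PySem.Str.split? text " - ").getD []) 1).getD "" ++ "\n\n"
    else s
  s ++ "</td>\n"

-- zip(it, it) on a list: consecutive disjoint pairs, a lone leftover element dropped
-- (hand port, exact: Python's zip of two copies of one iterator yields exactly these pairs)
def pvPairs : List String → List (String × String)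
  | x :: y :: r => (x, y) :: pvPairs r
  | _ => []

-- sep.join(rows), hand-ported exactly
def pvJoin (sep : String) : List String → String
  | [] => ""
  | [r] => r
  | r :: rest => r ++ sep ++ pvJoin sep rest

def create_features_grid_py_alt (features : List String) : String :=
  let cells := features.map pvCell
  let cells := if cells.length % 2 = 1 then cells ++ ["<td></td>\n"] else cells
  let rows := (pvPairs cells).map (fun p => p.1 ++ p.2)
  "<table>\n<tr>\n" ++ pvJoin "</tr>\n<tr>\n" rows ++ "</tr>\n</table>"

-- ===== PRECONDITION & SPEC =====
-- Pre_ excludes exactly the features that are empty or whitespace-only, on which Python A raises IndexError at feature.split()[0].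
def Pre_create_features_grid_py (features : List String) : Prop :=
  ∀ f ∈ features, PySem.Str.split₀ f ≠ []
instance (features : List String) : Decidable (Pre_create_features_grid_py features) := by
  unfold Pre_create_features_grid_py; infer_instance

def pvWitness_create_features_grid_py : List String :=
  ["* Fast - blazing speed", "* Clean output", "* Tested"]

def Spec_create_features_grid_py (features : List String) (out : String) : Prop := out = create_features_grid_py_alt features
instance (features : List String) (out : String) : Decidable (Spec_create_features_grid_py features out) := by unfold Spec_create_features_grid_py; infer_instance

-- ===== CLAIM (what is proved, stated in full; the proofs are below) =====
def Claim_equal_create_features_grid_py : Prop := ∀ (features : List String), Dom_create_features_grid_py features → Pre_create_features_grid_py features → Spec_create_features_grid_py features (create_features_grid_py features)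

-- ===== LEMMAS AND PROOFS =====

-- proof-side chunking view of consecutive pairs (lone trailing cell kept)
def pvRows : List String → List String
  | [] => []
  | [a] => [a]
  | a :: b :: r => (a ++ b) :: pvRows r

theorem pvPairs_map_eq_rows (cs : List String) (h : cs.length % 2 = 0) :
    (pvPairs cs).map (fun p : String × String => p.1 ++ p.2) = pvRows cs := by
  induction cs using pvRows.induct with
  | case1 => simp [pvPairs, pvRows]
  | case2 a => simp at h
  | case3 a b r ih =>
      simp only [pvPairs, pvRows, List.map_cons]
      rw [ih (by simp at h; omega)]

-- tail-of-join helper (proof-side only)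
def pvTail (sep : String) : List String → String
  | [] => ""
  | r :: rs => sep ++ r ++ pvTail sep rs

theorem pvJoin_eq_tail (sep : String) (r : String) (rs : List String) :
    pvJoin sep (r :: rs) = r ++ pvTail sep rs := by
  induction rs generalizing r with
  | nil => simp [pvJoin, pvTail]
  | cons b rs ih => simp [pvJoin, pvTail, ih, String.append_assoc]

theorem pvTail_rows_fill (sep x : String) (cs : List String) (h : cs.length % 2 = 1) :
    pvTail sep (pvRows (cs ++ [x])) = pvTail sep (pvRows cs) ++ x := by
  induction cs using pvRows.induct with
  | case1 => simp at h
  | case2 a => simp [pvRows, pvTail, String.append_assoc]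
  | case3 a b r ih =>
      simp only [List.cons_append, pvRows, pvTail]
      have h2 : r.length % 2 = 1 := by simp at h; omega
      rw [ih h2]
      simp [String.append_assoc]

theorem pv_fold_main (cs : List String) :
    ∀ (k : Nat) (g : String), 0 < k →
      (PySem.List.enumerate cs (2 * (k : Int))).foldl (fun grid p =>
        let i := p.1
        let feature := p.2
        let grid := if i > 0 ∧ PySem.Int.mod i 2 = 0 then grid ++ "</tr>\n<tr>\n" else grid
        let ws := PySem.Str.split₀ feature
        let emoji := (PySem.List.pyGet? ws 0).getD ""
        let text := PySem.Str.join " " (PySem.List.slice ws (some 1) none)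
        let grid := grid ++ "<td width=\"50%\">\n\n**" ++ emoji ++ " " ++
          (PySem.List.pyGet? ((PySem.Str.split? text " - ").getD []) 0).getD "" ++ "**\n\n"
        let grid := if PySem.Str.isIn " - " text then
            grid ++ "<br/>" ++ (PySem.List.pyGet? ((PySem.Str.split? text " - ").getD []) 1).getD "" ++ "\n\n"
          else grid
        grid ++ "</td>\n") g
      = g ++ pvTail "</tr>\n<tr>\n" (pvRows (cs.map pvCell)) := by
  induction cs using pvRows.induct with
  | case1 =>
      intro k g hk
      simp only [PySem.List.enumerate_nil, List.foldl_nil, List.map_nil, pvRows, pvTail,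
        String.append_empty]
  | case2 a =>
      intro k g hk
      have hc : (2 * (k : Int) > 0 ∧ PySem.Int.mod (2 * (k : Int)) 2 = 0) :=
        ⟨by omega, by simp only [PySem.Int.mod_eq_zero_iff_dvd]; omega⟩
      simp only [PySem.List.enumerate_cons, PySem.List.enumerate_nil, List.foldl_cons,
        List.foldl_nil, if_pos hc, List.map_cons, List.map_nil]
      simp only [pvRows, pvTail, pvCell]
      split_ifs <;> simp only [String.append_assoc, String.append_empty]
  | case3 a b r ih =>
      intro k g hk
      have hca : (2 * (k : Int) > 0 ∧ PySem.Int.mod (2 * (k : Int)) 2 = 0) :=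
        ⟨by omega, by simp only [PySem.Int.mod_eq_zero_iff_dvd]; omega⟩
      have hcb : ¬ (2 * (k : Int) + 1 > 0 ∧ PySem.Int.mod (2 * (k : Int) + 1) 2 = 0) := by
        simp only [PySem.Int.mod_eq_zero_iff_dvd]; omega
      have henum : (2 * (k : Int) + 1 + 1) = 2 * ((k + 1 : Nat) : Int) := by push_cast; ring
      simp only [PySem.List.enumerate_cons, List.foldl_cons, if_pos hca, if_neg hcb, henum]
      rw [ih (k + 1) _ (by omega)]
      simp only [List.map_cons, pvRows, pvTail, pvCell]
      split_ifs <;> simp only [String.append_assoc]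

-- ===== VERDICT (by name: the statement is the Claim_ definition above) =====
theorem create_features_grid_py_spec : Claim_equal_create_features_grid_py := by
  intro features hdom hpre
  unfold Spec_create_features_grid_py
  cases features with
  | nil =>
      unfold create_features_grid_py create_features_grid_py_alt
      dsimp only []
      rw [PySem.List.enumerate_nil, List.foldl_nil,
        if_neg (not_not_intro (by simp :
          PySem.Int.mod ((([] : List String).length : Nat) : Int) 2 = 0)),
        show List.map pvCell ([] : List String) = ([] : List String) from rfl,
        if_neg (by decide : ¬ (([] : List String).length % 2 = 1)),
        show pvJoin "</tr>\n<tr>\n" ((pvPairs ([] : List String)).map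
          (fun p : String × String => p.1 ++ p.2)) = "" from rfl,
        String.append_empty]
  | cons a fs =>
    cases fs with
    | nil =>
        unfold create_features_grid_py create_features_grid_py_alt
        dsimp only []
        rw [PySem.List.enumerate_cons, PySem.List.enumerate_nil, List.foldl_cons, List.foldl_nil]
        dsimp only []
        rw [if_neg (by simp only [PySem.Int.mod_eq_zero_iff_dvd]; omega :
              ¬ ((0 : Int) > 0 ∧ PySem.Int.mod 0 2 = 0)),
          if_pos (by simp :
              ¬ (PySem.Int.mod (([a] : List String).length : Int) 2 = 0)),
          show List.map pvCell [a] = [pvCell a] from rfl,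
          if_pos (by norm_num : ([pvCell a] : List String).length % 2 = 1),
          show pvJoin "</tr>\n<tr>\n" ((pvPairs ([pvCell a] ++ ["<td></td>\n"])).map
            (fun p : String × String => p.1 ++ p.2)) = pvCell a ++ "<td></td>\n" from rfl]
        dsimp only [pvCell]
        split_ifs <;> simp only [String.append_assoc]
    | cons b r =>
        unfold create_features_grid_py create_features_grid_py_alt
        dsimp only []
        rw [PySem.List.enumerate_cons, PySem.List.enumerate_cons, List.foldl_cons, List.foldl_cons]
        dsimp only []
        rw [if_neg (by simp only [PySem.Int.mod_eq_zero_iff_dvd]; omega :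
              ¬ ((0 : Int) > 0 ∧ PySem.Int.mod 0 2 = 0)),
          if_neg (by simp only [PySem.Int.mod_eq_zero_iff_dvd]; omega :
              ¬ ((0 : Int) + 1 > 0 ∧ PySem.Int.mod (0 + 1) 2 = 0)),
          show ((0 : Int) + 1 + 1) = 2 * ((1 : Nat) : Int) by norm_num,
          pv_fold_main r 1 _ (by omega),
          show List.map pvCell (a :: b :: r) = pvCell a :: pvCell b :: List.map pvCell r from rfl]
        by_cases hodd : r.length % 2 = 1
        · rw [if_pos (by simp only [List.length_cons, PySem.Int.mod_eq_zero_iff_dvd]; omega :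
                ¬ (PySem.Int.mod (((a :: b :: r : List String).length : Nat) : Int) 2 = 0)),
            if_pos (by simp only [List.length_cons, List.length_map]; omega :
                (pvCell a :: pvCell b :: List.map pvCell r).length % 2 = 1),
            show (pvCell a :: pvCell b :: List.map pvCell r) ++ ["<td></td>\n"] =
              pvCell a :: pvCell b :: (List.map pvCell r ++ ["<td></td>\n"]) from rfl,
            pvPairs_map_eq_rows (pvCell a :: pvCell b :: (List.map pvCell r ++ ["<td></td>\n"]))
              (by simp only [List.length_cons, List.length_append, List.length_map,
                List.length_cons, List.length_nil]; omega),
            show pvRows (pvCell a :: pvCell b :: (List.map pvCell r ++ ["<td></td>\n"])) =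
              (pvCell a ++ pvCell b) :: pvRows (List.map pvCell r ++ ["<td></td>\n"]) from rfl,
            pvJoin_eq_tail, pvTail_rows_fill _ _ _ (by simpa using hodd)]
          dsimp only [pvCell]
          split_ifs <;> simp only [String.append_assoc]
        · rw [if_neg (not_not_intro (by
                simp only [List.length_cons, PySem.Int.mod_eq_zero_iff_dvd]; omega :
                PySem.Int.mod (((a :: b :: r : List String).length : Nat) : Int) 2 = 0)),
            if_neg (by simp only [List.length_cons, List.length_map]; omega :
                ¬ ((pvCell a :: pvCell b :: List.map pvCell r).length % 2 = 1)),
            pvPairs_map_eq_rows (pvCell a :: pvCell b :: List.map pvCell r)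
              (by simp only [List.length_cons, List.length_map]; omega),
            show pvRows (pvCell a :: pvCell b :: List.map pvCell r) =
              (pvCell a ++ pvCell b) :: pvRows (List.map pvCell r) from rfl,
            pvJoin_eq_tail]
          dsimp only [pvCell]
          split_ifs <;> simp only [String.append_assoc]
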